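-- pv_equiv track=rewrite | github.com/daniel-reich/turbo-robot | LR98GCwLGYPSv8Afb_14.py | pluralize
-- ===== SOURCE A (Python) =====
-- def pluralize(lst):
--   new_list = []
--   for i in lst:
--     if lst.count(i) > 1:
--       new_list.append(i+'s')
--     else:
--       new_list.append(i)
--   return set(new_list)
-- ===== SOURCE B (Python) =====
-- def pluralize(lst):
--     # Sort once; duplicates in a sorted list are adjacent, so one scan of
--     # neighbouring pairs yields exactly the words occurring more than once.
--     s = sorted(lst)
--     dups = {a for a, b in zip(s, s[1:]) if a == b}
--     result = set()
--     for w in lst: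
--         result.add(w + 's' if w in dups else w)
--     return result
-- ===== Notes on version B (the rewrite author's own statement) =====
-- stated objective: alternative
-- what changed: B sorts the list once and detects duplicates by scanning adjacent equal pairs of the sorted copy, then tags each word in a single pass over the input, replacing A's per-element lst.count scan.
import Mathlib
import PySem

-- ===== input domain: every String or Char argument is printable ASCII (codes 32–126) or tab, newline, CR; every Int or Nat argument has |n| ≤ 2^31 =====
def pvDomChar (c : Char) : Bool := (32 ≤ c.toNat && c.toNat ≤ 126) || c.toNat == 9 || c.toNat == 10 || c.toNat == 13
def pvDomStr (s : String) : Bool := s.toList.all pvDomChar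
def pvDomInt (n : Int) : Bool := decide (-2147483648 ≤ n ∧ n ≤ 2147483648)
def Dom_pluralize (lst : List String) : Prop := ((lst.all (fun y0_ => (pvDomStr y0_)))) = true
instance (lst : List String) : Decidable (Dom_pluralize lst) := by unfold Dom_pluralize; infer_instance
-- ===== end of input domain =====

-- B sorts the list once and finds the duplicated words by scanning adjacent equal pairs of
-- the sorted copy, then tags each word in one pass over the input (objective: alternative).

-- ===== PORT A =====
def pluralize (lst : List String) : List String :=
  let new_list : List String :=
    lst.foldl (fun new_list i =>
      if PySem.List.count lst i > 1 then new_list ++ [i ++ "s"] else new_list ++ [i]) []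
  PySem.Set.ofList new_list

-- ===== PORT B =====
def pluralize_alt (lst : List String) : List String :=
  let s := PySem.List.sorted lst (fun x => x) false
  -- {a for a, b in zip(s, s[1:]) if a == b}: only membership in this set is used below
  let dups : PySem.Set String :=
    PySem.Set.ofList (((s.zip (PySem.List.slice s (some 1) none)).filter
      (fun p => p.1 == p.2)).map Prod.fst)
  lst.foldl (fun result w =>
    PySem.Set.add result (if dups.contains w then w ++ "s" else w)) PySem.Set.empty

-- ===== PRECONDITION & SPEC =====
def Spec_pluralize (lst : List String) (out : List String) : Prop := out = pluralize_alt lst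
instance (lst : List String) (out : List String) : Decidable (Spec_pluralize lst out) := by unfold Spec_pluralize; infer_instance

-- ===== CLAIM =====
def Claim_equal_pluralize : Prop := ∀ (lst : List String), Dom_pluralize lst → Spec_pluralize lst (pluralize lst)

-- ===== LEMMAS AND PROOFS =====

-- In a (·≤·)-sorted list, a word appears twice iff it appears as an adjacent equal pair.
theorem pvAdj_iff_two_le_count (s : List String) (hp : s.Pairwise (· ≤ ·)) (w : String) :
    (w, w) ∈ s.zip s.tail ↔ 2 ≤ s.count w := by
  induction s with
  | nil => simp
  | cons a t ih =>
    cases t with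
    | nil => by_cases h : a = w <;> simp [h]
    | cons b t' =>
      have hp' : (b :: t').Pairwise (· ≤ ·) := hp.of_cons
      have hab : a ≤ b := (List.pairwise_cons.mp hp).1 b (by simp)
      have ih' := ih hp'
      show (w, w) ∈ (a, b) :: ((b :: t').zip (b :: t').tail) ↔ _
      rw [List.mem_cons]
      constructor
      · rintro (h | h)
        · have ha : w = a := congrArg Prod.fst h
          have hb : w = b := congrArg Prod.snd h
          subst ha; subst hb
          simp
        · exact le_trans (ih'.mp h) (List.Sublist.count_le w (List.sublist_cons_self a _))
      · intro h
        by_cases haw : a = w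
        · subst haw
          have hmem : a ∈ b :: t' := by
            rw [List.count_cons] at h
            simp at h
            exact List.mem_cons.mpr h
          have hba : b = a := (List.mem_cons.mp hmem).elim (fun h' => h'.symm)
            (fun h' => le_antisymm ((List.pairwise_cons.mp hp').1 a h') hab)
          left; rw [hba]
        · right
          apply ih'.mpr
          rw [List.count_cons] at h
          simp [haw] at h
          exact h

-- membership in B's duplicate set = "occurs more than once in lst"
theorem pvDups_contains (lst : List String) (w : String) :
    PySem.Set.contains
      (PySem.Set.ofList ((((PySem.List.sorted lst (fun x => x) false).zip
        (PySem.List.slice (PySem.List.sorted lst (fun x => x) false) (some 1) none)).filter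
        (fun p => p.1 == p.2)).map Prod.fst)) w
      = decide (2 ≤ lst.count w) := by
  set s := PySem.List.sorted lst (fun x => x) false with hs
  rw [PySem.List.slice_from_one]
  have hperm : s.Perm lst := PySem.List.sorted_perm lst (fun x => x) false
  have hpair : s.Pairwise (· ≤ ·) := PySem.List.sorted_pairwise lst (fun x => x)
  have hmem : w ∈ (((s.zip s.tail).filter (fun p => p.1 == p.2)).map Prod.fst)
      ↔ (w, w) ∈ s.zip s.tail := by
    simp only [List.mem_map, List.mem_filter]
    constructor
    · rintro ⟨⟨p1, p2⟩, ⟨hmem, heq⟩, hw⟩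
      simp only [beq_iff_eq] at heq
      simp only at hw
      subst hw; subst heq; exact hmem
    · intro h; exact ⟨(w, w), ⟨h, by simp⟩, rfl⟩
  have key : PySem.Set.contains
      (PySem.Set.ofList (((s.zip s.tail).filter (fun p => p.1 == p.2)).map Prod.fst)) w = true
      ↔ 2 ≤ lst.count w := by
    rw [PySem.Set.contains_iff, PySem.Set.mem_ofList, hmem,
      pvAdj_iff_two_le_count s hpair w, hperm.count_eq]
  by_cases h : 2 ≤ lst.count w
  · rw [key.mpr h, decide_eq_true h]
  · rw [decide_eq_false h]
    exact Bool.eq_false_iff.mpr (fun hc => h (key.mp hc))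

-- A's loop builds the elementwise-pluralized list.
theorem pvA_eq_map (lst : List String) :
    pluralize lst =
      PySem.Set.ofList (lst.map (fun i => if PySem.List.count lst i > 1 then i ++ "s" else i)) := by
  unfold pluralize
  rw [show (fun (new_list : List String) i =>
        if PySem.List.count lst i > 1 then new_list ++ [i ++ "s"] else new_list ++ [i]) =
      (fun new_list i =>
        new_list ++ [if PySem.List.count lst i > 1 then i ++ "s" else i]) from by
      funext acc i; split <;> rfl]
  rw [PySem.List.foldl_append_singleton_eq_map]
  rfl

-- B's loop is set(map(g, lst)) for g = tag-by-dups-membership.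
theorem pvB_eq_map (lst : List String) :
    pluralize_alt lst =
      PySem.Set.ofList (lst.map (fun w => if 2 ≤ lst.count w then w ++ "s" else w)) := by
  unfold pluralize_alt
  dsimp only
  rw [← PySem.Set.update_map_eq_foldl_add,
    show (PySem.Set.empty : PySem.Set String) = [] from rfl, PySem.Set.update_nil_left]
  refine congrArg PySem.Set.ofList (List.map_congr_left ?_)
  intro w _
  rw [pvDups_contains]
  by_cases h : 2 ≤ lst.count w <;> simp [h]

-- ===== VERDICT =====
theorem pluralize_spec : Claim_equal_pluralize := by
  intro lst _
  show pluralize lst = pluralize_alt lst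
  rw [pvA_eq_map, pvB_eq_map]
  refine congrArg PySem.Set.ofList (List.map_congr_left ?_)
  intro i _
  have : (PySem.List.count lst i > 1) ↔ (2 ≤ lst.count i) := by
    rw [PySem.List.count_eq]; constructor <;> intro h <;> [exact_mod_cast h; exact_mod_cast h]
  rw [if_congr this rfl rfl]
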